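-- pv_equiv track=rewrite | github.com/faint4/waf-bypass-tester | src/encoder.py | build_chunked_body
-- ===== SOURCE A (Python) =====
-- def chunked_body(payload: str, chunk_size: int = 3) -> list[tuple[str, str]]:
--     """分块传输编码（成功率83%）
--     来源：payloadplayground.com 2025
--     返回: [(chunk_size_hex, chunk_data), ...] 用于构建分块请求体
--     """
--     chunks = []
--     data = payload.encode('utf-8')
--     for i in range(0, len(data), chunk_size):
--         chunk = data[i:i+chunk_size]
--         chunks.append((format(len(chunk), 'x'), chunk.decode('utf-8', errors='replace')))
--     chunks.append(('0', ''))  # 终止块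
--     return chunks
--
-- def build_chunked_body(payload: str, chunk_size: int = 3) -> str:
--     """构建完整的分块传输编码请求体字符串"""
--     chunks = chunked_body(payload, chunk_size)
--     result = ''
--     for size_hex, data in chunks:
--         result += size_hex + '\r\n'
--         if data:
--             result += data + '\r\n'
--     return result
-- ===== SOURCE B (Python) =====
-- def build_chunked_body(payload: str, chunk_size: int = 3) -> str:
--     """Single-pass: split the payload into pieces, format each piece, join."""
--     pieces = [payload[i:i + chunk_size] for i in range(0, len(payload), chunk_size)]
--     return ''.join('%x\r\n%s\r\n' % (len(c), c) for c in pieces) + '0\r\n'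
-- ===== Notes on version B (the rewrite author's own statement) =====
-- stated objective: simpler
-- what changed: Replaces A's two-function pipeline (build an intermediate list of (hex-size, chunk) tuples, then a second accumulating loop with a conditional data line) with a single split-map-join over the payload text, appending the terminator chunk directly; on the claimed ASCII domain slicing the string equals slicing its UTF-8 bytes.
import Mathlib
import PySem

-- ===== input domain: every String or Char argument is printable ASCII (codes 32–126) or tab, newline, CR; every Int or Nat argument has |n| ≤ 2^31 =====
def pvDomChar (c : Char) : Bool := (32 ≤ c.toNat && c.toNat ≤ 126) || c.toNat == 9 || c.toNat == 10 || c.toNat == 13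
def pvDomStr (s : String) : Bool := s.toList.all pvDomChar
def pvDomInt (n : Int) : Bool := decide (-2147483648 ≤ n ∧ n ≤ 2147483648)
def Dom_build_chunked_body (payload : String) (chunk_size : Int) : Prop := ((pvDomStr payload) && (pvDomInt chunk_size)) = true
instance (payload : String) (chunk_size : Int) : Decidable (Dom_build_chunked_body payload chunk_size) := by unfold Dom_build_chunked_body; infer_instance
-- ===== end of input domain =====

-- B collapses A's two-function pipeline (tuple list built by chunked_body, then a second
-- accumulating loop) into one split-map-join over the payload; objective: simpler, not faster.
-- On the ASCII domain stated by Dom_ each character is one UTF-8 byte, so slicing the string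
-- equals slicing its UTF-8 encoding.

-- shared helper: format(n, 'x') — lowercase hex digits of a Nat
def pvHexDigit (n : Nat) : Char := if n < 10 then Char.ofNat (48 + n) else Char.ofNat (87 + n)

def pvHexAux (n : Nat) (acc : List Char) : List Char :=
  if h : n = 0 then acc else pvHexAux (n / 16) (pvHexDigit (n % 16) :: acc)
termination_by n
decreasing_by exact Nat.div_lt_self (by omega) (by omega)

def pvToHex (n : Nat) : List Char := if n = 0 then ['0'] else pvHexAux n []

-- ===== PORT A =====
-- literal port of chunked_body: list of (hex-size, chunk) pairs, then the terminator pair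
def pvChunkedBody (payload : String) (chunk_size : Int) : List (List Char × List Char) :=
  let data := payload.toList
  let chunks : List (List Char × List Char) :=
    (PySem.List.pyRange 0 (PySem.List.len data) chunk_size).foldl
      (fun chunks i =>
        let chunk := PySem.List.slice data (some i) (some (i + chunk_size))
        chunks ++ [(pvToHex chunk.length, chunk)]) []
  chunks ++ [(['0'], [])]

def build_chunked_body (payload : String) (chunk_size : Int) : String :=
  let chunks := pvChunkedBody payload chunk_size
  String.mk (chunks.foldl
    (fun result p =>
      let result := result ++ (p.1 ++ ['\r', '\n'])
      if p.2 ≠ [] then result ++ (p.2 ++ ['\r', '\n']) else result) [])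

-- ===== PORT B =====
def build_chunked_body_alt (payload : String) (chunk_size : Int) : String :=
  let cs := payload.toList
  let pieces := (PySem.List.pyRange 0 (PySem.List.len cs) chunk_size).map
    (fun i => PySem.List.slice cs (some i) (some (i + chunk_size)))
  String.mk ((pieces.map (fun c => pvToHex c.length ++ ['\r', '\n'] ++ c ++ ['\r', '\n'])).flatten
    ++ ['0', '\r', '\n'])

-- ===== PRECONDITION & SPEC =====
-- Pre_ excludes only chunk_size = 0, where Python's range raises ValueError (in A and in B alike).
def Pre_build_chunked_body (payload : String) (chunk_size : Int) : Prop := chunk_size ≠ 0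
instance (payload : String) (chunk_size : Int) : Decidable (Pre_build_chunked_body payload chunk_size) := by unfold Pre_build_chunked_body; infer_instance

def pvWitness_build_chunked_body : String × Int := ("hello", 2)

def Spec_build_chunked_body (payload : String) (chunk_size : Int) (out : String) : Prop := out = build_chunked_body_alt payload chunk_size
instance (payload : String) (chunk_size : Int) (out : String) : Decidable (Spec_build_chunked_body payload chunk_size out) := by unfold Spec_build_chunked_body; infer_instance

-- ===== CLAIM (what is proved, stated in full; the proofs are below) =====
def Claim_equal_build_chunked_body : Prop := ∀ (payload : String) (chunk_size : Int), Dom_build_chunked_body payload chunk_size → Pre_build_chunked_body payload chunk_size → Spec_build_chunked_body payload chunk_size (build_chunked_body payload chunk_size)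

-- ===== LEMMAS AND PROOFS =====

-- A's second loop, as append of the flattened piece renderings
theorem pvFoldPieces (l : List (List Char × List Char)) (acc : List Char) :
    l.foldl (fun result p =>
      let result := result ++ (p.1 ++ ['\r', '\n'])
      if p.2 ≠ [] then result ++ (p.2 ++ ['\r', '\n']) else result) acc
    = acc ++ (l.map (fun p =>
        (p.1 ++ ['\r', '\n']) ++ (if p.2 ≠ [] then p.2 ++ ['\r', '\n'] else []))).flatten := by
  induction l generalizing acc with
  | nil => simp
  | cons p t ih =>
    simp only [List.foldl_cons, List.map_cons, List.flatten_cons, ih]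
    split_ifs <;> simp [List.append_assoc]

theorem pvRange_neg_nil (n k : Int) (hn : 0 ≤ n) (hk : k < 0) :
    PySem.List.pyRange 0 n k = [] := by
  simp [PySem.List.pyRange]
  split_ifs with h1 h2 <;> omega

theorem pvSlice_ne_nil {α : Type} (xs : List α) (i k : Int)
    (h0 : 0 ≤ i) (hi : i < xs.length) (hk : 1 ≤ k) :
    PySem.List.slice xs (some i) (some (i + k)) ≠ [] := by
  have hlen := PySem.List.length_slice xs i (i + k)
  have hci : PySem.List.clampIdx xs.length i = i.toNat := by
    simp [PySem.List.clampIdx]; split_ifs <;> omega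
  have hcj : i.toNat < PySem.List.clampIdx xs.length (i + k) := by
    simp [PySem.List.clampIdx]; split_ifs <;> omega
  intro hnil
  rw [hnil] at hlen
  simp at hlen
  omega

theorem build_chunked_body_eq (payload : String) (chunk_size : Int)
    (hk : chunk_size ≠ 0) :
    build_chunked_body payload chunk_size = build_chunked_body_alt payload chunk_size := by
  unfold build_chunked_body build_chunked_body_alt pvChunkedBody
  simp only [PySem.List.len_eq, PySem.List.foldl_append_singleton_eq_map, List.nil_append,
    pvFoldPieces, List.map_append, List.map_map, List.flatten_append]
  rcases lt_or_gt_of_ne hk with hneg | hpos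
  · rw [pvRange_neg_nil _ _ (by positivity) hneg]
    rfl
  · have : ∀ i ∈ PySem.List.pyRange 0 (payload.toList.length : Int) chunk_size,
        ((fun p : List Char × List Char =>
            (p.1 ++ ['\r', '\n']) ++ (if p.2 ≠ [] then p.2 ++ ['\r', '\n'] else [])) ∘
          fun i => (pvToHex (PySem.List.slice payload.toList (some i) (some (i + chunk_size))).length,
                    PySem.List.slice payload.toList (some i) (some (i + chunk_size)))) i
        = pvToHex (PySem.List.slice payload.toList (some i) (some (i + chunk_size))).length
            ++ ['\r', '\n'] ++ PySem.List.slice payload.toList (some i) (some (i + chunk_size))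
            ++ ['\r', '\n'] := by
      intro i hi
      rw [PySem.List.mem_pyRange_iff_of_pos hpos] at hi
      have hne := pvSlice_ne_nil payload.toList i chunk_size hi.1 (by exact_mod_cast hi.2.1) (by omega)
      simp [hne, List.append_assoc]
    rw [List.map_congr_left this]
    simp [Function.comp_def]

-- ===== VERDICT (by name: the statement is the Claim_ definition above) =====
theorem build_chunked_body_spec : Claim_equal_build_chunked_body := by
  intro payload chunk_size _ hpre
  unfold Spec_build_chunked_body
  exact build_chunked_body_eq payload chunk_size hpre
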